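-- pv_equiv track=rewrite | github.com/adamtry/advent-of-code-2022 | Day06: Tuning Trouble/index.py | find_distinct_character_sequence_indexes
-- ===== SOURCE A (Python) =====
-- def is_marker(signal_extract: str):
--     # Returns True if all characters in signal extract are unique else False
--     signal_chars = sorted(list(signal_extract))
--     removed_duplicates = sorted(list(set(signal_chars)))
--     all_characters_unique = signal_chars == removed_duplicates
--     return all_characters_unique
--
-- def find_distinct_character_sequence_indexes(input_string, distinct_length):
--     indexes: list[int] = []
--     for char_index in range(0, len(input_string) - distinct_length):
--         scan = input_string[char_index:char_index + distinct_length]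
--         if is_marker(scan):
--             indexes.append(
--                 char_index + distinct_length
--             )
--     return indexes
-- ===== SOURCE B (Python) =====
-- def find_distinct_character_sequence_indexes(input_string, distinct_length):
--     # Sliding window over the start positions: keep per-character counts of the
--     # current window and the number of characters occurring more than once, so
--     # each slide is O(1) instead of re-sorting the window.
--     indexes = []
--     counts = {}
--     duplicates = 0
--     for char in input_string[:distinct_length]:
--         counts[char] = counts.get(char, 0) + 1
--         if counts[char] == 2:
--             duplicates += 1
--     for start in range(len(input_string) - distinct_length):
--         if duplicates == 0:
--             indexes.append(start + distinct_length)
--         dropped = input_string[start]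
--         counts[dropped] = counts.get(dropped, 0) - 1
--         if counts[dropped] == 1:
--             duplicates -= 1
--         added = input_string[start + distinct_length]
--         counts[added] = counts.get(added, 0) + 1
--         if counts[added] == 2:
--             duplicates += 1
--     return indexes
-- ===== Notes on version B (the rewrite author's own statement) =====
-- stated objective: faster
-- what changed: A re-checks every length-L window from scratch by sorting it and comparing with its sorted deduplication; B slides a window keeping per-character counts and a counter of duplicated characters, updating both in O(1) per step. Pre_ excludes negative window lengths, where A returns start indexes of empty out-of-string windows (an accident of Python slicing) and B raises IndexError.
-- outside the precondition, e.g. on find_distinct_character_sequence_indexes('abc', -2): A returns [-2, -1, 0, 1, 2], B raises IndexError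
import Mathlib
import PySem

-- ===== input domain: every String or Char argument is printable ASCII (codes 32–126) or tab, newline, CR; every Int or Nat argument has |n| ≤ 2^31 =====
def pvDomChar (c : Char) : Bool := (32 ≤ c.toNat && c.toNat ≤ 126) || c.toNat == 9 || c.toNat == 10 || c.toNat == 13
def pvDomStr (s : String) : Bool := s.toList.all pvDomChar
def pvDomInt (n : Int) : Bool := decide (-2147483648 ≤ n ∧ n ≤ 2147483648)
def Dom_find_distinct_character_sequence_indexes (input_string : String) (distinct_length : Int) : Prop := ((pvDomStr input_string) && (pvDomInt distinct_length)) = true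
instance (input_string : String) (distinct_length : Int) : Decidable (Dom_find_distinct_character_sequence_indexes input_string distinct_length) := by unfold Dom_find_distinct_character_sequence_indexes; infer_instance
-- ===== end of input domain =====

-- B replaces A's per-window sort/dedup check by a sliding window with per-character
-- counts and a duplicated-character counter, updated in O(1) per slide (objective: faster).

-- ===== PORT A =====
def pv_is_marker (signal_extract : String) : Bool :=
  let signal_chars := PySem.List.sorted signal_extract.toList (fun x => x)
  let removed_duplicates := PySem.List.sorted (PySem.Set.ofList signal_chars) (fun x => x)
  signal_chars == removed_duplicates

def find_distinct_character_sequence_indexes (input_string : String) (distinct_length : Int) : List Int :=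
  (PySem.List.pyRange 0 ((input_string.toList.length : Int) - distinct_length) 1).foldl
    (fun indexes char_index =>
      let scan := PySem.Str.slice input_string (some char_index) (some (char_index + distinct_length))
      if pv_is_marker scan then indexes ++ [char_index + distinct_length] else indexes) []

-- ===== PORT B =====
-- first loop of Source B: build the counts of the initial window and its duplicate counter
def pvStepInit (st : PySem.Dict Char Int × Int) (c : Char) : PySem.Dict Char Int × Int :=
  let v := st.1.getD c 0 + 1
  (st.1.insert c v, if v = 2 then st.2 + 1 else st.2)

-- second loop of Source B: record the window end if duplicate-free, then slide by one
-- (s[start] / s[start + L] are in range on every index the loop visits when 1 ≤ L)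
def pvStepSlide (s : String) (L : Int) (st : List Int × PySem.Dict Char Int × Int)
    (start : Int) : List Int × PySem.Dict Char Int × Int :=
  let idx := if st.2.2 = 0 then st.1 ++ [start + L] else st.1
  let dropped := (PySem.Str.pyGet? s start).getD ' '
  let v1 := st.2.1.getD dropped 0 - 1
  let d1 := st.2.1.insert dropped v1
  let dup1 := if v1 = 1 then st.2.2 - 1 else st.2.2
  let added := (PySem.Str.pyGet? s (start + L)).getD ' '
  let v2 := d1.getD added 0 + 1
  (idx, d1.insert added v2, if v2 = 2 then dup1 + 1 else dup1)

def find_distinct_character_sequence_indexes_alt (input_string : String) (distinct_length : Int) : List Int :=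
  let init := (PySem.Str.slice input_string none (some distinct_length)).toList.foldl
    pvStepInit (PySem.Dict.empty, 0)
  ((PySem.List.pyRange 0 ((input_string.toList.length : Int) - distinct_length) 1).foldl
    (pvStepSlide input_string distinct_length) ([], init.1, init.2)).1

-- ===== PRECONDITION & SPEC =====
-- Pre_ excludes negative window lengths, where A returns start indexes of empty
-- out-of-string windows (an accident of Python slicing) and B raises IndexError.
def Pre_find_distinct_character_sequence_indexes (input_string : String) (distinct_length : Int) : Prop :=
  0 ≤ distinct_length
instance (input_string : String) (distinct_length : Int) : Decidable (Pre_find_distinct_character_sequence_indexes input_string distinct_length) := by unfold Pre_find_distinct_character_sequence_indexes; infer_instance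

def pvWitness_find_distinct_character_sequence_indexes : String × Int := ("mjqjpqmgbljsphdztnvjfqwrcgsmlb", 4)

def Spec_find_distinct_character_sequence_indexes (input_string : String) (distinct_length : Int) (out : List Int) : Prop := out = find_distinct_character_sequence_indexes_alt input_string distinct_length
instance (input_string : String) (distinct_length : Int) (out : List Int) : Decidable (Spec_find_distinct_character_sequence_indexes input_string distinct_length out) := by unfold Spec_find_distinct_character_sequence_indexes; infer_instance

-- ===== CLAIM (what is proved, stated in full; the proofs are below) =====
def Claim_equal_find_distinct_character_sequence_indexes : Prop := ∀ (input_string : String) (distinct_length : Int), Dom_find_distinct_character_sequence_indexes input_string distinct_length → Pre_find_distinct_character_sequence_indexes input_string distinct_length → Spec_find_distinct_character_sequence_indexes input_string distinct_length (find_distinct_character_sequence_indexes input_string distinct_length)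

-- ===== LEMMAS AND PROOFS =====

theorem pv_is_marker_iff (s : String) : pv_is_marker s = true ↔ s.toList.Nodup := by
  unfold pv_is_marker
  rw [beq_iff_eq, PySem.List.sorted_id_eq_sorted_id_iff_perm]
  constructor
  · intro h
    exact (h.nodup_iff).mpr (PySem.Set.nodup_ofList _)
  · intro h
    have hs : (PySem.List.sorted s.toList (fun x => x)).Nodup :=
      ((PySem.List.sorted_perm s.toList (fun x => x) false).nodup_iff).mpr h
    rw [PySem.Set.ofList_eq_self_of_nodup _ hs]
    exact (PySem.List.sorted_perm s.toList (fun x => x) false).symm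

theorem pvMapFilter {α : Type} (f : α → Int) (p : α → Bool) (l : List α) :
    List.map f (List.filter p l) = List.filterMap (fun x => if p x then some (f x) else none) l := by
  induction l with
  | nil => rfl
  | cons a l ih => by_cases h : p a <;> simp [h, ih]

-- characterisation of A's output: one check per window start
theorem pvA_char (s : String) (L : Int) (hL : 0 ≤ L) :
    find_distinct_character_sequence_indexes s L =
    (List.range ((s.toList.length : Int) - L).toNat).filterMap
      (fun i => if ((s.toList.drop i).take L.toNat).Nodup then some ((i : Int) + L) else none) := by
  unfold find_distinct_character_sequence_indexes
  rw [PySem.List.pyRange_one, List.foldl_map]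
  rw [PySem.List.foldl_append_if
    (p := fun (k : Nat) => pv_is_marker (PySem.Str.slice s (some (0 + (k : Int))) (some (0 + (k : Int) + L))))
    (f := fun (k : Nat) => 0 + (k : Int) + L)]
  rw [List.nil_append, pvMapFilter, sub_zero]
  apply List.filterMap_congr
  intro k hk
  have hsl : (PySem.Str.slice s (some (0 + (k : Int))) (some (0 + (k : Int) + L))).toList
      = (s.toList.drop k).take L.toNat := by
    rw [PySem.Str.toList_slice, PySem.Chars.slice_eq_listSlice,
      PySem.List.slice_toNat (a := 0 + (k : Int)) (b := 0 + (k : Int) + L) s.toList (by omega) (by omega)]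
    rw [show (0 + (k : Int) + L).toNat - (0 + (k : Int)).toNat = L.toNat by omega,
      show (0 + (k : Int)).toNat = k by omega]
  by_cases hnd : ((s.toList.drop k).take L.toNat).Nodup
  · rw [if_pos, if_pos hnd]
    · simp only [zero_add]
    · rw [pv_is_marker_iff, hsl]; exact hnd
  · rw [if_neg, if_neg hnd]
    rw [pv_is_marker_iff, hsl]; exact hnd

-- number of characters occurring at least twice in w (what Source B's `duplicates` holds)
def pvD (w : List Char) : Int :=
  ∑ c ∈ w.toFinset, (if 2 ≤ w.count c then 1 else 0)

theorem pvD_nil : pvD [] = 0 := by simp [pvD]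

theorem pvD_cons (x : Char) (m : List Char) :
    pvD (x :: m) = pvD m + (if m.count x = 1 then 1 else 0) := by
  unfold pvD
  by_cases hx : x ∈ m
  · have hxF : x ∈ m.toFinset := List.mem_toFinset.mpr hx
    have hins : (x :: m).toFinset = m.toFinset := by
      rw [List.toFinset_cons, Finset.insert_eq_self.mpr hxF]
    rw [hins,
      ← Finset.add_sum_erase _ (fun c => if 2 ≤ (x :: m).count c then (1:Int) else 0) hxF,
      ← Finset.add_sum_erase _ (fun c => if 2 ≤ m.count c then (1:Int) else 0) hxF]
    have hsum : ∑ c ∈ m.toFinset.erase x, (if 2 ≤ (x :: m).count c then (1:Int) else 0)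
        = ∑ c ∈ m.toFinset.erase x, (if 2 ≤ m.count c then (1:Int) else 0) := by
      refine Finset.sum_congr rfl (fun c hc => ?_)
      have hcx : c ≠ x := Finset.ne_of_mem_erase hc
      simp [Ne.symm hcx]
    rw [hsum]
    have hcount : 1 ≤ m.count x := List.count_pos_iff.mpr hx
    have hcx2 : (x :: m).count x = m.count x + 1 := by simp [List.count_cons]
    rw [hcx2]
    split_ifs <;> omega
  · have hx0 : m.count x = 0 := List.count_eq_zero.mpr hx
    rw [List.toFinset_cons, Finset.sum_insert (by simpa using hx)]
    have h1 : (x :: m).count x = 1 := by simp [hx0]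
    rw [h1, if_neg (by omega), if_neg (by omega), zero_add, add_zero]
    refine Finset.sum_congr rfl (fun c hc => ?_)
    have hcx : c ≠ x := fun h => hx (h ▸ List.mem_toFinset.mp hc)
    simp [Ne.symm hcx]

theorem pvD_perm {w v : List Char} (h : w.Perm v) : pvD w = pvD v := by
  unfold pvD
  rw [List.toFinset_eq_of_perm _ _ h]
  exact Finset.sum_congr rfl (fun c _ => by rw [h.count_eq])

theorem pvD_eq_zero_iff (w : List Char) : pvD w = 0 ↔ w.Nodup := by
  unfold pvD
  rw [Finset.sum_eq_zero_iff_of_nonneg (fun c _ => by split_ifs <;> norm_num),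
    List.nodup_iff_count_le_one]
  constructor
  · intro h a
    by_cases ha : a ∈ w
    · have := h a (List.mem_toFinset.mpr ha)
      by_contra hc
      rw [if_pos (by omega)] at this
      norm_num at this
    · rw [List.count_eq_zero.mpr ha]; omega
  · intro h c _
    rw [if_neg (by have := h c; omega)]

-- first loop of Source B: counts = character counts of the processed prefix, dup = pvD
theorem pvInit (w : List Char) :
    (∀ c, (w.foldl pvStepInit (PySem.Dict.empty, 0)).1.getD c 0 = (w.count c : Int))
    ∧ (w.foldl pvStepInit (PySem.Dict.empty, 0)).2 = pvD w := by
  induction w using List.reverseRecOn with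
  | nil =>
    refine ⟨fun c => ?_, ?_⟩
    · simp [PySem.Dict.getD_empty]
    · simp [pvD_nil]
  | append_singleton w x ih =>
    obtain ⟨hc, hd⟩ := ih
    rw [List.foldl_append]
    simp only [List.foldl_cons, List.foldl_nil, pvStepInit]
    refine ⟨fun c => ?_, ?_⟩
    · rw [PySem.Dict.getD_insert]
      by_cases hcx : c = x
      · subst hcx
        rw [if_pos rfl, hc c]
        have : (w ++ [c]).count c = w.count c + 1 := by simp
        rw [this]; push_cast; ring
      · rw [if_neg hcx, hc c]
        have : (w ++ [x]).count c = w.count c := by simp [List.count_append, Ne.symm hcx]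
        rw [this]
    · have hp : pvD (w ++ [x]) = pvD w + (if w.count x = 1 then 1 else 0) := by
        rw [pvD_perm (List.perm_append_singleton x w), pvD_cons]
      rw [hd, hc x, hp]
      by_cases h1 : w.count x = 1
      · rw [if_pos h1, if_pos (by omega)]
      · rw [if_neg h1, if_neg (by omega), add_zero]

theorem pvWin_cons (cs : List Char) (Lt k : Nat) (h1 : 1 ≤ Lt) (h2 : k < cs.length) :
    (cs.drop k).take Lt = cs[k] :: ((cs.drop (k+1)).take (Lt - 1)) := by
  conv_lhs => rw [List.drop_eq_getElem_cons h2, show Lt = (Lt - 1) + 1 from by omega]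
  rw [List.take_succ_cons]

theorem pvWin_snoc (cs : List Char) (Lt k : Nat) (h1 : 1 ≤ Lt) (h2 : k + Lt < cs.length) :
    (cs.drop (k+1)).take Lt = ((cs.drop (k+1)).take (Lt - 1)) ++ [cs[k + Lt]] := by
  conv_lhs => rw [show Lt = (Lt - 1) + 1 from by omega]
  rw [List.take_add_one, List.getElem?_drop, show k + 1 + (Lt - 1) = k + Lt from by omega,
    List.getElem?_eq_getElem h2]
  rfl

-- second loop of Source B: invariant after k slides
theorem pvSlideInv (s : String) (L : Int) (hL : 1 ≤ L)
    (st0 : List Int × PySem.Dict Char Int × Int)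
    (h1 : st0.1 = [])
    (h2 : ∀ c, st0.2.1.getD c 0 = ((s.toList.take L.toNat).count c : Int))
    (h3 : st0.2.2 = pvD (s.toList.take L.toNat))
    (k : Nat) (hk : k ≤ ((s.toList.length : Int) - L).toNat) :
    (((List.range k).map (fun (j : Nat) => (j : Int))).foldl (pvStepSlide s L) st0).1
      = (List.range k).filterMap
        (fun i => if ((s.toList.drop i).take L.toNat).Nodup then some ((i : Int) + L) else none)
    ∧ (∀ c, (((List.range k).map (fun (j : Nat) => (j : Int))).foldl (pvStepSlide s L) st0).2.1.getD c 0
        = (((s.toList.drop k).take L.toNat).count c : Int))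
    ∧ (((List.range k).map (fun (j : Nat) => (j : Int))).foldl (pvStepSlide s L) st0).2.2
        = pvD ((s.toList.drop k).take L.toNat) := by
  induction k with
  | zero => simpa using ⟨h1, h2, h3⟩
  | succ k ih =>
    obtain ⟨ih1, ih2, ih3⟩ := ih (by omega)
    have hkI : (k : Int) + 1 ≤ (s.toList.length : Int) - L := by omega
    have hLpos : 1 ≤ L.toNat := by omega
    have hkcs : k < s.toList.length := by omega
    have hky : k + L.toNat < s.toList.length := by omega
    rw [List.range_succ, List.map_append, List.foldl_append]
    set r := ((List.range k).map (fun (j : Nat) => (j : Int))).foldl (pvStepSlide s L) st0 with hr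
    simp only [List.map_cons, List.map_nil, List.foldl_cons, List.foldl_nil]
    set x := s.toList[k] with hx
    set m := (s.toList.drop (k+1)).take (L.toNat - 1) with hm
    set y := s.toList[k + L.toNat] with hy
    have hw1 : (s.toList.drop k).take L.toNat = x :: m := pvWin_cons s.toList L.toNat k hLpos hkcs
    have hw2 : (s.toList.drop (k+1)).take L.toNat = m ++ [y] := pvWin_snoc s.toList L.toNat k hLpos hky
    have hdrop : (PySem.Str.pyGet? s (k : Int)).getD ' ' = x := by
      rw [PySem.Str.pyGet?_natCast, List.getElem?_eq_getElem hkcs]; rfl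
    have hadd : (PySem.Str.pyGet? s ((k : Int) + L)).getD ' ' = y := by
      rw [show (k : Int) + L = ((k + L.toNat : Nat) : Int) from by push_cast; omega,
        PySem.Str.pyGet?_natCast, List.getElem?_eq_getElem hky]; rfl
    rw [hw1] at ih2 ih3
    simp only [pvStepSlide, hdrop, hadd]
    have hv1 : r.2.1.getD x 0 - 1 = (m.count x : Int) := by
      rw [ih2 x]
      have : (x :: m).count x = m.count x + 1 := by simp [List.count_cons]
      rw [this]; push_cast; ring
    have hmid : ∀ c, (r.2.1.insert x (r.2.1.getD x 0 - 1)).getD c 0 = (m.count c : Int) := by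
      intro c
      rw [PySem.Dict.getD_insert]
      by_cases hcx : c = x
      · subst hcx; rw [if_pos rfl, hv1]
      · rw [if_neg hcx, ih2 c]
        have : (x :: m).count c = m.count c := by simp [Ne.symm hcx]
        rw [this]
    refine ⟨?_, fun c => ?_, ?_⟩
    · rw [ih3, ih1, List.filterMap_append]
      simp only [List.filterMap_cons, List.filterMap_nil, hw1]
      by_cases hnd : (x :: m).Nodup
      · rw [if_pos ((pvD_eq_zero_iff _).mpr hnd), if_pos hnd]
      · rw [if_neg (fun h0 => hnd ((pvD_eq_zero_iff _).mp h0)), if_neg hnd, List.append_nil]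
    · rw [hw2, PySem.Dict.getD_insert]
      by_cases hcy : c = y
      · rw [if_pos hcy, hmid y, hcy]
        have hcnt : (m ++ [y]).count y = m.count y + 1 := by simp
        rw [hcnt]; push_cast; ring
      · rw [if_neg hcy, hmid c]
        have : (m ++ [y]).count c = m.count c := by simp [List.count_append, Ne.symm hcy]
        rw [this]
    · rw [hw2, pvD_perm (List.perm_append_singleton y m), pvD_cons]
      have hmid' : (r.2.1.insert x ((m.count x : Nat) : Int)).getD y 0 = (m.count y : Int) := by
        rw [← hv1]; exact hmid y
      simp only [hv1, hmid', ih3, pvD_cons]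
      split_ifs <;> omega

-- degenerate zero-length windows: every window is [] and Source B's counters never move
theorem pvSlideInv0 (s : String) (st0 : List Int × PySem.Dict Char Int × Int)
    (h1 : st0.1 = [])
    (h2 : ∀ c, st0.2.1.getD c 0 = 0)
    (h3 : st0.2.2 = 0)
    (k : Nat) :
    (((List.range k).map (fun (j : Nat) => (j : Int))).foldl (pvStepSlide s 0) st0).1
      = (List.range k).map (fun (i : Nat) => (i : Int) + 0)
    ∧ (∀ c, (((List.range k).map (fun (j : Nat) => (j : Int))).foldl (pvStepSlide s 0) st0).2.1.getD c 0 = 0)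
    ∧ (((List.range k).map (fun (j : Nat) => (j : Int))).foldl (pvStepSlide s 0) st0).2.2 = 0 := by
  induction k with
  | zero => simpa using ⟨h1, h2, h3⟩
  | succ k ih =>
    obtain ⟨ih1, ih2, ih3⟩ := ih
    rw [List.range_succ, List.map_append, List.foldl_append]
    set r := ((List.range k).map (fun (j : Nat) => (j : Int))).foldl (pvStepSlide s 0) st0 with hr
    simp only [List.map_cons, List.map_nil, List.foldl_cons, List.foldl_nil, pvStepSlide, add_zero]
    set x := (PySem.Str.pyGet? s (k : Int)).getD ' ' with hx
    have hv1 : r.2.1.getD x 0 - 1 = -1 := by rw [ih2 x]; norm_num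
    have hmid : (r.2.1.insert x (r.2.1.getD x 0 - 1)).getD x 0 = -1 := by
      rw [PySem.Dict.getD_insert, if_pos rfl, hv1]
    refine ⟨?_, fun c => ?_, ?_⟩
    · rw [ih3, if_pos rfl, ih1]
      simp
    · rw [PySem.Dict.getD_insert]
      by_cases hcx : c = x
      · rw [if_pos hcx, hmid]; norm_num
      · rw [if_neg hcx, PySem.Dict.getD_insert, if_neg hcx, ih2 c]
    · rw [hmid, hv1, ih3]
      norm_num

-- ===== VERDICT (by name: the statement is the Claim_ definition above) =====
theorem find_distinct_character_sequence_indexes_spec : Claim_equal_find_distinct_character_sequence_indexes := by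
  intro s L _hDom hPre
  have hL0 : 0 ≤ L := hPre
  unfold Spec_find_distinct_character_sequence_indexes
  rw [pvA_char s L hL0]
  unfold find_distinct_character_sequence_indexes_alt
  have hslice : (PySem.Str.slice s none (some L)).toList = s.toList.take L.toNat := by
    rw [PySem.Str.toList_slice, PySem.Chars.slice_eq_listSlice, PySem.List.slice_to _ (by omega)]
  have hrange : PySem.List.pyRange 0 ((s.toList.length : Int) - L) 1
      = (List.range ((s.toList.length : Int) - L).toNat).map (fun (j : Nat) => (j : Int)) := by
    rw [PySem.List.pyRange_one]
    simp only [zero_add, sub_zero]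
  obtain ⟨hc, hd⟩ := pvInit (s.toList.take L.toNat)
  rw [hslice, hrange]
  by_cases hL : 1 ≤ L
  · exact ((pvSlideInv s L hL _ rfl hc hd _ le_rfl).1).symm
  · have hLz : L = 0 := by omega
    subst hLz
    have h2' : ∀ c, ((s.toList.take (0:Int).toNat).foldl pvStepInit (PySem.Dict.empty, 0)).1.getD c 0 = 0 := by
      intro c; rw [hc c]; simp
    have h3' : ((s.toList.take (0:Int).toNat).foldl pvStepInit (PySem.Dict.empty, 0)).2 = 0 := by
      rw [hd]; simp [pvD_nil]
    rw [(pvSlideInv0 s _ rfl h2' h3' _).1]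
    have hcong : ∀ i ∈ List.range ((s.toList.length : Int) - 0).toNat,
        (if ((s.toList.drop i).take (0:Int).toNat).Nodup then some ((i : Int) + 0) else none)
          = some ((i : Int) + 0) := by
      intro i _; simp
    rw [List.filterMap_congr hcong]
    simp
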